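-- pv_equiv track=rewrite | github.com/machnevegor/PUM-VKBot | botCode/workWithUsersDatabase/UserSearcher.py | string_to_array_converter
-- ===== SOURCE A (Python) =====
-- def string_to_array_converter(string_to_convert):
--     # preparing variables for the conversion process
--     array_data = []
--     str_element = 0
--     # converting a string to an array
--     while str_element != len(list(string_to_convert)):
--         if list(string_to_convert)[str_element] not in ["[", "'", ",", " ", "]"]:
--             array_cell = []
--             quantity_checks = str_element
--             while quantity_checks != len(list(string_to_convert)):
--                 if list(string_to_convert)[quantity_checks] not in ["[", "'", ",", " ", "]"]:
--                     array_cell.append(list(string_to_convert)[quantity_checks])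
--                 else:
--                     array_data.append("".join(array_cell))
--                     str_element = quantity_checks
--                     break
--                 quantity_checks += 1
--         str_element += 1
--     # returning the final result
--     return array_data
-- ===== SOURCE B (Python) =====
-- def string_to_array_converter(string_to_convert):
--     delims = {"[", "'", ",", " ", "]"}
--     result = []
--     buf = []
--     for ch in string_to_convert:
--         if ch in delims:
--             if buf:
--                 result.append("".join(buf))
--                 buf = []
--         else:
--             buf.append(ch)
--     # deliberately no final flush: a trailing run with no closing delimiter yields no token
--     return result
-- ===== Notes on version B (the rewrite author's own statement) =====
-- stated objective: faster
-- what changed: Replaced the nested start-finder plus inner rescanner (which rebuilds list(string) on every check) with a single linear pass that maintains a current-token buffer and flushes it on each delimiter.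
import Mathlib
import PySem

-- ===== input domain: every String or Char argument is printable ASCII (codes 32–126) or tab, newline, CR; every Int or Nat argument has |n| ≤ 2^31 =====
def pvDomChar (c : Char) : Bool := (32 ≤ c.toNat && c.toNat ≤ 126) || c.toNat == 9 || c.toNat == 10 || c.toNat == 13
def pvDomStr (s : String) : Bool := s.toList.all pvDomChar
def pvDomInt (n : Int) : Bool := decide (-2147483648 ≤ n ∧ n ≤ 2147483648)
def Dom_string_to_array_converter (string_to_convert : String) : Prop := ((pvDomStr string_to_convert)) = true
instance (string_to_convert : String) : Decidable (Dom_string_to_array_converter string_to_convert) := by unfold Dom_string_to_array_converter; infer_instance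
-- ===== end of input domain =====

-- B replaces A's quadratic nested rescanning with one linear buffer-accumulating pass (objective: faster).

-- ===== PORT A =====
-- the delimiter membership test `c in ["[", "'", ",", " ", "]"]` shared by both ports
def isDelim (c : Char) : Bool := c == '[' || c == '\'' || c == ',' || c == ' ' || c == ']'

-- A's inner while-loop: scan from index q collecting non-delimiters into array_cell;
-- on a delimiter return the joined token and the break position, at end of string return none.
-- `fuel` encodes the loop bound (the loop runs at most l.length - q times); callers pass enough.
def innerA (l : List Char) (fuel : Nat) (q : Nat) (cell : List Char) : Option (String × Nat) :=
  match fuel with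
  | 0 => none
  | fuel + 1 =>
    if h : q < l.length then
      if isDelim l[q] then some (String.ofList cell, q)
      else innerA l fuel (q + 1) (cell ++ [l[q]])
    else none

-- A's outer while-loop over str_element; `fuel` again bounds the number of iterations.
def outerA (l : List Char) (fuel : Nat) (i : Nat) (acc : List String) : List String :=
  match fuel with
  | 0 => acc
  | fuel + 1 =>
    if h : i < l.length then
      if isDelim l[i] then outerA l fuel (i + 1) acc
      else
        match innerA l (l.length - i) i [] with
        | some (t, p) => outerA l fuel (p + 1) (acc ++ [t])
        | none => outerA l fuel (i + 1) acc
    else acc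

def string_to_array_converter (string_to_convert : String) : List String :=
  outerA string_to_convert.toList string_to_convert.toList.length 0 []

-- ===== PORT B =====
-- the loop body of B: on a delimiter flush the non-empty buffer, otherwise extend the buffer
def stepB (st : List String × List Char) (ch : Char) : List String × List Char :=
  if isDelim ch then
    if st.2.isEmpty then st else (st.1 ++ [String.ofList st.2], [])
  else (st.1, st.2 ++ [ch])

-- one linear pass over the characters; no final flush of a trailing unterminated token
def string_to_array_converter_alt (string_to_convert : String) : List String :=
  (string_to_convert.toList.foldl stepB ([], [])).1

-- ===== PRECONDITION & SPEC =====
def Spec_string_to_array_converter (string_to_convert : String) (out : List String) : Prop := out = string_to_array_converter_alt string_to_convert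
instance (string_to_convert : String) (out : List String) : Decidable (Spec_string_to_array_converter string_to_convert out) := by unfold Spec_string_to_array_converter; infer_instance

-- ===== CLAIM (what is proved, stated in full; the proofs are below) =====
def Claim_equal_string_to_array_converter : Prop := ∀ (string_to_convert : String), Dom_string_to_array_converter string_to_convert → Spec_string_to_array_converter string_to_convert (string_to_array_converter string_to_convert)

-- ===== LEMMAS AND PROOFS =====

-- structural form of B's fold state machine
def goB (xs : List Char) (buf : List Char) (acc : List String) : List String :=
  match xs with
  | [] => acc
  | c :: cs =>
      if isDelim c then
        if buf.isEmpty then goB cs buf acc else goB cs [] (acc ++ [String.ofList buf])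
      else goB cs (buf ++ [c]) acc

theorem foldl_eq_goB (xs : List Char) (buf : List Char) (acc : List String) :
    (xs.foldl stepB (acc, buf)).1 = goB xs buf acc := by
  induction xs generalizing buf acc with
  | nil => simp [goB]
  | cons c cs ih =>
      simp only [List.foldl_cons, goB]
      by_cases hd : isDelim c <;> by_cases hb : buf.isEmpty
      · rw [show stepB (acc, buf) c = (acc, buf) by simp [stepB, hd, hb], if_pos hd, if_pos hb, ih]
      · rw [show stepB (acc, buf) c = (acc ++ [String.ofList buf], []) by simp [stepB, hd, hb],
            if_pos hd, if_neg (by simp [hb]), ih]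
      · rw [show stepB (acc, buf) c = (acc, buf ++ [c]) by simp [stepB, hd], if_neg (by simp [hd]), ih]
      · rw [show stepB (acc, buf) c = (acc, buf ++ [c]) by simp [stepB, hd], if_neg (by simp [hd]), ih]

theorem goB_all_nondelim {xs : List Char} (h : ∀ c ∈ xs, isDelim c = false)
    (buf : List Char) (acc : List String) : goB xs buf acc = acc := by
  induction xs generalizing buf with
  | nil => rfl
  | cons c cs ih =>
      have hc := h c (by simp)
      simp [goB, hc, ih (fun d hd => h d (by simp [hd]))]

theorem goB_prefix {pre : List Char} (h : ∀ c ∈ pre, isDelim c = false)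
    (ys : List Char) (buf : List Char) (acc : List String) :
    goB (pre ++ ys) buf acc = goB ys (buf ++ pre) acc := by
  induction pre generalizing buf with
  | nil => simp
  | cons c cs ih =>
      have hc : isDelim c = false := h c (by simp)
      rw [List.cons_append, goB, if_neg (by simp [hc]),
          ih (fun d hd => h d (by simp [hd]))]
      simp

theorem innerA_le {l : List Char} {fuel q : Nat} {cell : List Char} {t : String} {p : Nat}
    (h : innerA l fuel q cell = some (t, p)) : q ≤ p ∧ p < l.length := by
  induction fuel generalizing q cell with
  | zero => simp [innerA] at h
  | succ fuel ih =>
      rw [innerA] at h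
      split at h
      · split at h
        · simp only [Option.some.injEq, Prod.mk.injEq] at h
          omega
        · have := ih h
          omega
      · simp at h

theorem innerA_none {l : List Char} {fuel q : Nat} {cell : List Char}
    (hfuel : l.length ≤ q + fuel) (h : innerA l fuel q cell = none) :
    ∀ c ∈ l.drop q, isDelim c = false := by
  induction fuel generalizing q cell with
  | zero =>
      intro c hc
      rw [List.drop_eq_nil_of_le (by omega)] at hc
      simp at hc
  | succ fuel ih =>
      rw [innerA] at h
      split at h
      · rename_i h1
        split at h
        · simp at h
        · rename_i h2
          rw [List.drop_eq_getElem_cons h1]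
          intro c hc
          rcases List.mem_cons.mp hc with hc | hc
          · subst hc; simpa using h2
          · exact ih (by omega) h c hc
      · rename_i h1
        intro c hc
        rw [List.drop_eq_nil_of_le (by omega)] at hc
        simp at hc

theorem innerA_some {l : List Char} {fuel q : Nat} {cell : List Char} {t : String} {p : Nat}
    (h : innerA l fuel q cell = some (t, p)) :
    ∃ pre d suf, l.drop q = pre ++ d :: suf ∧ (∀ c ∈ pre, isDelim c = false) ∧
      isDelim d = true ∧ t = String.ofList (cell ++ pre) ∧ p = q + pre.length := by
  induction fuel generalizing q cell with
  | zero => simp [innerA] at h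
  | succ fuel ih =>
      rw [innerA] at h
      split at h
      · rename_i h1
        split at h
        · rename_i h2
          simp only [Option.some.injEq, Prod.mk.injEq] at h
          obtain ⟨ht', hp'⟩ := h
          exact ⟨[], l[q], l.drop (q + 1), List.drop_eq_getElem_cons h1, by simp, h2,
            by simp [← ht'], by simp [hp']⟩
        · rename_i h2
          obtain ⟨pre, d, suf, hdrop, hpre, hd, ht, hp⟩ := ih h
          refine ⟨l[q] :: pre, d, suf, ?_, ?_, hd, ?_, ?_⟩
          · rw [List.drop_eq_getElem_cons h1, hdrop]; simp
          · intro c hc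
            rcases List.mem_cons.mp hc with hc | hc
            · subst hc; simpa using h2
            · exact hpre c hc
          · simpa using ht
          · simp only [List.length_cons]; omega
      · simp at h

theorem outerA_eq_goB (l : List Char) (fuel i : Nat) (acc : List String)
    (hfuel : l.length ≤ i + fuel) : outerA l fuel i acc = goB (l.drop i) [] acc := by
  induction fuel generalizing i acc with
  | zero =>
      rw [outerA, List.drop_eq_nil_of_le (by omega)]
      rfl
  | succ fuel ih =>
      rw [outerA]
      split
      · rename_i h1
        split
        · rename_i h2
          rw [List.drop_eq_getElem_cons h1, goB, if_pos h2, if_pos (show ([] : List Char).isEmpty = true from rfl)]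
          exact ih _ _ (by omega)
        · rename_i h2
          split
          · rename_i t p h3
            obtain ⟨hip, hpl⟩ := innerA_le h3
            obtain ⟨pre, d, suf, hdrop, hpre, hd, ht, hp⟩ := innerA_some h3
            have hpre_ne : pre ≠ [] := by
              intro hnil
              subst hnil
              rw [List.drop_eq_getElem_cons h1] at hdrop
              simp only [List.nil_append] at hdrop
              have hld : l[i] = d := (List.cons_eq_cons.mp hdrop).1
              rw [hld, hd] at h2
              exact h2 rfl
            rw [hdrop, goB_prefix hpre, goB]
            rw [if_pos hd, if_neg (by simpa using hpre_ne)]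
            have hsuf : l.drop (p + 1) = suf := by
              have : l.drop (p + 1) = (l.drop i).drop (pre.length + 1) := by
                rw [List.drop_drop]; congr 1; omega
              rw [this, hdrop]
              rw [show pre.length + 1 = (pre ++ [d]).length by simp]
              rw [show pre ++ d :: suf = (pre ++ [d]) ++ suf by simp]
              simp
            rw [ih _ _ (by omega), hsuf, ht]
          · rename_i h3
            have hall := innerA_none (by omega) h3
            have htail : ∀ c ∈ l.drop (i + 1), isDelim c = false := by
              intro c hc
              exact hall c (by rw [List.drop_eq_getElem_cons h1]; exact List.mem_cons_of_mem _ hc)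
            rw [ih _ _ (by omega), goB_all_nondelim htail, goB_all_nondelim hall]
      · rename_i h1
        rw [List.drop_eq_nil_of_le (by omega)]
        rfl

-- ===== VERDICT (by name: the statement is the Claim_ definition above) =====
theorem string_to_array_converter_spec : Claim_equal_string_to_array_converter := by
  intro s _
  unfold Spec_string_to_array_converter string_to_array_converter string_to_array_converter_alt
  rw [foldl_eq_goB, outerA_eq_goB _ _ _ _ (by omega), List.drop_zero]
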